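-- pv_equiv track=rewrite | github.com/chani06/logistics-ai-planner | app_before_restore.py | get_allowed_vehicle_for_branch
-- ===== SOURCE A (Python) =====
-- def get_allowed_vehicle_for_branch(branch_code, zone, restrictions):
--     allowed = restrictions.get(str(branch_code).strip(), ['4W', 'JB', '6W'])
--     if zone == 'CENTRAL' and '6W' in allowed:
--         allowed = [v for v in allowed if v != '6W']
--     for v in ['6W', 'JB', '4W']:
--         if v in allowed:
--             return v
--     return allowed[0]
-- ===== SOURCE B (Python) =====
-- _NAMES = ['6W', 'JB', '4W']
--
--
-- def get_allowed_vehicle_for_branch(branch_code, zone, restrictions):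
--     allowed = restrictions.get(str(branch_code).strip(), ['4W', 'JB', '6W'])
--     if zone == 'CENTRAL':
--         allowed = [v for v in allowed if v != '6W']
--     best = 3
--     for v in allowed:
--         if v in _NAMES:
--             best = min(best, _NAMES.index(v))
--     return _NAMES[best] if best < 3 else allowed[0]
-- ===== Notes on version B (the rewrite author's own statement) =====
-- stated objective: alternative
-- what changed: Instead of A's three membership scans over the allowed list in priority order, B makes a single pass over allowed maintaining a numeric best-rank accumulator (min over indices into the fixed priority table) and decodes the final rank back to a vehicle name, falling back to allowed[0] when no known vehicle occurs.
-- outside the precondition, e.g. on get_allowed_vehicle_for_branch('B1', 'CENTRAL', {'B1': ['6W']}): A raises IndexError, B raises IndexError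
import Mathlib
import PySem

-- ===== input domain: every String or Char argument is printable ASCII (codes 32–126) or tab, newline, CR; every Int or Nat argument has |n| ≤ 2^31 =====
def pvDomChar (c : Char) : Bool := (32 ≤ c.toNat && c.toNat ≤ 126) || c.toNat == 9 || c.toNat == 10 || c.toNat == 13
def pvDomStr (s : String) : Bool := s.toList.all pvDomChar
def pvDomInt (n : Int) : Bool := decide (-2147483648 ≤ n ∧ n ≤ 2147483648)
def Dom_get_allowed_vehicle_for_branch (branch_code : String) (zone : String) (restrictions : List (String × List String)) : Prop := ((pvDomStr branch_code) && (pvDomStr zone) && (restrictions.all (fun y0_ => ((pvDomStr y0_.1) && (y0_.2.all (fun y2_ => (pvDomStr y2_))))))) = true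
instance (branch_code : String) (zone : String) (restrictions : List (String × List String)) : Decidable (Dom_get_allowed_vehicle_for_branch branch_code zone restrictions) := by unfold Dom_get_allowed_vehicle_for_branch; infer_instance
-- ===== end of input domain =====

-- B replaces A's three priority-ordered membership scans with one pass that folds a numeric
-- best-rank accumulator over the allowed list and decodes it at the end: alternative
-- decomposition, same cost. Return-value equivalence only; no mutation.

-- ===== PORT A =====
-- dict.get with default, first-match lookup on the association list
def pvLookup (branch_code : String) (restrictions : List (String × List String)) : List String :=
  ((restrictions.find? (fun p => p.1 == PySem.Str.strip branch_code)).map Prod.snd).getD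
    ["4W", "JB", "6W"]

def get_allowed_vehicle_for_branch (branch_code : String) (zone : String)
    (restrictions : List (String × List String)) : String :=
  let allowed := pvLookup branch_code restrictions
  let allowed :=
    if zone == "CENTRAL" && allowed.contains "6W" then
      allowed.filter (fun v => v != "6W")
    else allowed
  -- for v in ['6W','JB','4W']: if v in allowed: return v  (unrolled literal loop)
  if allowed.contains "6W" then "6W"
  else if allowed.contains "JB" then "JB"
  else if allowed.contains "4W" then "4W"
  else PySem.List.pyGetD allowed 0 ""   -- allowed[0]; IndexError (empty list) excluded by Pre_

-- ===== PORT B =====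
def pvNames : List String := ["6W", "JB", "4W"]

def get_allowed_vehicle_for_branch_alt (branch_code : String) (zone : String)
    (restrictions : List (String × List String)) : String :=
  let allowed := pvLookup branch_code restrictions
  let allowed := if zone == "CENTRAL" then allowed.filter (fun v => v != "6W") else allowed
  -- best = 3; for v in allowed: if v in _NAMES: best = min(best, _NAMES.index(v))
  let best := allowed.foldl
    (fun b v => if pvNames.contains v then min b ((PySem.List.index? pvNames v).getD 3) else b) 3
  -- _NAMES[best] if best < 3 else allowed[0]; allowed[0] IndexError excluded by Pre_
  if best < 3 then PySem.List.pyGetD pvNames (best : Int) ""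
  else PySem.List.pyGetD allowed 0 ""

-- ===== PRECONDITION & SPEC =====
-- the allowed list after the CENTRAL filter (filtering is a no-op when '6W' is absent)
def pvEffective (branch_code : String) (zone : String)
    (restrictions : List (String × List String)) : List String :=
  if zone == "CENTRAL" then (pvLookup branch_code restrictions).filter (fun v => v != "6W")
  else pvLookup branch_code restrictions

-- Pre_ excludes inputs whose effective allowed list is empty: both A and B raise
-- IndexError there (allowed[0] on an empty list), so neither program returns a value.
def Pre_get_allowed_vehicle_for_branch (branch_code : String) (zone : String)
    (restrictions : List (String × List String)) : Prop :=
  pvEffective branch_code zone restrictions ≠ []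
instance (branch_code : String) (zone : String) (restrictions : List (String × List String)) : Decidable (Pre_get_allowed_vehicle_for_branch branch_code zone restrictions) := by unfold Pre_get_allowed_vehicle_for_branch; infer_instance

def pvWitness_get_allowed_vehicle_for_branch : String × String × (List (String × List String)) :=
  ("B1", "NORTH", [("B1", ["4W", "JB"])])

def Spec_get_allowed_vehicle_for_branch (branch_code : String) (zone : String) (restrictions : List (String × List String)) (out : String) : Prop := out = get_allowed_vehicle_for_branch_alt branch_code zone restrictions
instance (branch_code : String) (zone : String) (restrictions : List (String × List String)) (out : String) : Decidable (Spec_get_allowed_vehicle_for_branch branch_code zone restrictions out) := by unfold Spec_get_allowed_vehicle_for_branch; infer_instance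

-- ===== CLAIM (what is proved, stated in full; the proofs are below) =====
def Claim_equal_get_allowed_vehicle_for_branch : Prop := ∀ (branch_code : String) (zone : String) (restrictions : List (String × List String)), Dom_get_allowed_vehicle_for_branch branch_code zone restrictions → Pre_get_allowed_vehicle_for_branch branch_code zone restrictions → Spec_get_allowed_vehicle_for_branch branch_code zone restrictions (get_allowed_vehicle_for_branch branch_code zone restrictions)

-- ===== LEMMAS AND PROOFS =====

-- the rank B's fold step computes for one element
def pvRnk (v : String) : Nat :=
  if v = "6W" then 0 else if v = "JB" then 1 else if v = "4W" then 2 else 3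

-- B's fold step as a function of the accumulator and the element
theorem pvStep_eq (b : Nat) (hb : b ≤ 3) (v : String) :
    (if pvNames.contains v then min b ((PySem.List.index? pvNames v).getD 3) else b)
      = min b (pvRnk v) := by
  by_cases h0 : v = "6W"
  · subst h0
    rw [show pvNames.contains "6W" = true from by decide,
        show (PySem.List.index? pvNames "6W").getD 3 = 0 from by decide,
        show pvRnk "6W" = 0 from by decide]
    simp
  by_cases h1 : v = "JB"
  · subst h1
    rw [show pvNames.contains "JB" = true from by decide,
        show (PySem.List.index? pvNames "JB").getD 3 = 1 from by decide,
        show pvRnk "JB" = 1 from by decide]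
    simp
  by_cases h2 : v = "4W"
  · subst h2
    rw [show pvNames.contains "4W" = true from by decide,
        show (PySem.List.index? pvNames "4W").getD 3 = 2 from by decide,
        show pvRnk "4W" = 2 from by decide]
    simp
  have hc : pvNames.contains v = false := by
    simp [pvNames, h0, h1, h2]
  rw [hc]
  simp [pvRnk, h0, h1, h2]
  omega

-- the fold as a min over plain ranks
theorem pvFold_eq (l : List String) (b : Nat) (hb : b ≤ 3) :
    l.foldl (fun b v =>
        if pvNames.contains v then min b ((PySem.List.index? pvNames v).getD 3) else b) b
      = l.foldl (fun b v => min b (pvRnk v)) b := by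
  induction l generalizing b with
  | nil => rfl
  | cons a t ih =>
    simp only [List.foldl_cons]
    rw [pvStep_eq b hb a]
    exact ih (min b (pvRnk a)) (by omega)

def pvMr (l : List String) : Nat := l.foldl (fun b v => min b (pvRnk v)) 3

theorem pvMr_acc (l : List String) (b : Nat) (hb : b ≤ 3) :
    l.foldl (fun b v => min b (pvRnk v)) b = min b (pvMr l) := by
  induction l generalizing b with
  | nil => simp [pvMr]; omega
  | cons a t ih =>
    have hr : pvRnk a ≤ 3 := by unfold pvRnk; split_ifs <;> omega
    simp only [pvMr, List.foldl_cons]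
    rw [ih (min b (pvRnk a)) (by omega), ih (min 3 (pvRnk a)) (by omega)]
    omega

theorem pvMr_cons (a : String) (t : List String) :
    pvMr (a :: t) = min (pvRnk a) (pvMr t) := by
  have hr : pvRnk a ≤ 3 := by unfold pvRnk; split_ifs <;> omega
  simp only [pvMr, List.foldl_cons]
  rw [pvMr_acc t (min 3 (pvRnk a)) (by omega)]
  have hm : pvMr t ≤ 3 := by
    have := pvMr_acc t 3 (le_refl 3)
    simp only [pvMr] at *
    omega
  simp only [pvMr]
  omega

-- characterization of the minimum rank by membership
theorem pvMr_char (l : List String) :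
    pvMr l = if "6W" ∈ l then 0 else if "JB" ∈ l then 1
             else if "4W" ∈ l then 2 else 3 := by
  induction l with
  | nil => simp [pvMr]
  | cons a t ih =>
    rw [pvMr_cons, ih]
    by_cases h0 : a = "6W" <;> by_cases h1 : a = "JB" <;> by_cases h2 : a = "4W" <;>
      by_cases m0 : "6W" ∈ t <;> by_cases m1 : "JB" ∈ t <;> by_cases m2 : "4W" ∈ t <;>
        simp_all [pvRnk, List.mem_cons, eq_comm]

-- A's unrolled scan agrees with B's decode of the minimum rank, on a nonempty list
theorem pvChain_eq_decode (l : List String) (_h : l ≠ []) :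
    (if l.contains "6W" then "6W"
     else if l.contains "JB" then "JB"
     else if l.contains "4W" then "4W"
     else PySem.List.pyGetD l 0 "")
      = (if pvMr l < 3 then PySem.List.pyGetD pvNames ((pvMr l : Nat) : Int) ""
         else PySem.List.pyGetD l 0 "") := by
  rw [pvMr_char]
  by_cases m0 : "6W" ∈ l <;> by_cases m1 : "JB" ∈ l <;> by_cases m2 : "4W" ∈ l <;>
    simp_all [pvNames, PySem.List.pyGetD]

-- the CENTRAL filter is a no-op when '6W' is absent
theorem pvFilter_no6W (l : List String) (h : "6W" ∉ l) :
    l.filter (fun v => v != "6W") = l := by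
  apply List.filter_eq_self.mpr
  intro a ha
  simp only [bne_iff_ne, ne_eq]
  intro rfl
  exact h ha

-- ===== VERDICT (by name: the statement is the Claim_ definition above) =====
theorem get_allowed_vehicle_for_branch_spec : Claim_equal_get_allowed_vehicle_for_branch := by
  intro bc zone r _ hpre
  unfold Pre_get_allowed_vehicle_for_branch pvEffective at hpre
  unfold Spec_get_allowed_vehicle_for_branch
  unfold get_allowed_vehicle_for_branch get_allowed_vehicle_for_branch_alt
  simp only
  by_cases hz : (zone == "CENTRAL") = true
  · rw [if_pos hz] at hpre
    by_cases h6 : "6W" ∈ pvLookup bc r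
    · rw [pvFold_eq _ 3 (le_refl 3)]
      simpa [hz, h6, pvMr] using
        pvChain_eq_decode ((pvLookup bc r).filter (fun v => v != "6W")) hpre
    · rw [pvFilter_no6W (pvLookup bc r) h6] at hpre
      rw [pvFold_eq _ 3 (le_refl 3)]
      simpa [hz, h6, pvFilter_no6W (pvLookup bc r) h6, pvMr] using
        pvChain_eq_decode (pvLookup bc r) hpre
  · rw [if_neg hz] at hpre
    rw [pvFold_eq _ 3 (le_refl 3)]
    simpa [hz, pvMr] using pvChain_eq_decode (pvLookup bc r) hpre
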